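-- pv_equiv track=rewrite | github.com/wangwenju269/leetcode | 滑动数组单调栈贪心算法/670. 最大交换.py | process
-- ===== SOURCE A (Python) =====
-- def process(digit):
--     nums = list(str(digit))
--     n = len(nums)
--     id_max = n-1
--     id1,id2 = -1,-1
--     for i in range(n-1,-1,-1):
--         if nums[i] > nums[id_max]:
--             id_max = i
--         elif nums[i] < nums[id_max]:
--             id1, id2 = i, id_max
--         '相等的不做任何处理操作'
--     if  id1 == -1:
--         return digit
--     nums[id1], nums[id2] = nums[id2], nums[id1]
--     return int(''.join(nums))
-- ===== SOURCE B (Python) =====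
-- def process(digit):
--     s = list(str(digit))
--     last = {}
--     for i, c in enumerate(s):
--         last[c] = i
--     for i, c in enumerate(s):
--         for d in "987654321":
--             if d <= c:
--                 break
--             j = last.get(d, -1)
--             if j > i:
--                 s[i], s[j] = s[j], s[i]
--                 return int(''.join(s))
--     return digit
-- ===== Notes on version B (the rewrite author's own statement) =====
-- stated objective: alternative
-- what changed: A makes one right-to-left pass tracking the rightmost running suffix maximum and the last qualifying swap pair; B instead builds a last-occurrence table of the digit characters and scans left-to-right, probing candidate digits '9' down to the current char against that table, swapping at the first position that admits a larger later digit.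
import Mathlib
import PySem

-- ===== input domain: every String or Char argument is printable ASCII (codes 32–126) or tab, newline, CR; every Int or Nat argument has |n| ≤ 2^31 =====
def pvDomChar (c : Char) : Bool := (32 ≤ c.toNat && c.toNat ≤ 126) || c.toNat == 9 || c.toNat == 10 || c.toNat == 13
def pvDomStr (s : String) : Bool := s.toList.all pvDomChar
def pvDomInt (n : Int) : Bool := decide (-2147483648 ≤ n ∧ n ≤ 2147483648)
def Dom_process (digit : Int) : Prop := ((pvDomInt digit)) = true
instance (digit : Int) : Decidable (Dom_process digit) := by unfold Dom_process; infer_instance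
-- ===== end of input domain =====

-- B replaces A's single right-to-left scan (tracking the running suffix maximum) by a
-- last-occurrence table plus a left-to-right scan over candidate digits '9'..'1';
-- objective: alternative decomposition, same O(n) cost. Equivalence is on return values.

-- ===== PORT A =====
-- for i in range(n-1,-1,-1): fuel = i+1, the step processes index i
def aLoop (nums : List Char) : Nat → Int × Int × Int → Int × Int × Int
  | 0, st => st
  | i + 1, (idMax, id1, id2) =>
    let ci := (PySem.List.pyGet? nums (i : Int)).getD ' '
    let cm := (PySem.List.pyGet? nums idMax).getD ' '
    if cm < ci then aLoop nums i ((i : Int), id1, id2)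
    else if ci < cm then aLoop nums i (idMax, (i : Int), idMax)
    else aLoop nums i (idMax, id1, id2)

def process (digit : Int) : Int :=
  let nums := PySem.Int.toChars digit
  let n := nums.length
  match aLoop nums n ((n : Int) - 1, -1, -1) with
  | (_, id1, id2) =>
    if id1 = -1 then digit
    else
      -- id1, id2 are ≥ 0 whenever this branch runs, so .toNat is exact here
      let c1 := (PySem.List.pyGet? nums id1).getD ' '
      let c2 := (PySem.List.pyGet? nums id2).getD ' '
      -- int(''.join(nums)): none (ValueError, only for digit < 0) is outside Pre_process
      (PySem.Int.ofChars? ((nums.set id1.toNat c2).set id2.toNat c1)).getD 0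

-- ===== PORT B =====
def candDigits : List Char := ['9', '8', '7', '6', '5', '4', '3', '2', '1']

-- inner 'for d in "987654321"' loop of Source B (break → none without a swap)
def bInner (s : List Char) (last : PySem.Dict Char Int) (i : Int) (c : Char) :
    List Char → Option Int
  | [] => none
  | d :: ds =>
    if d ≤ c then none
    else
      let j := last.getD d (-1)
      if i < j then
        -- i, j are ≥ 0 on this branch, so .toNat is exact here
        let cj := (PySem.List.pyGet? s j).getD ' '
        some ((PySem.Int.ofChars? ((s.set i.toNat cj).set j.toNat c)).getD 0)
      else bInner s last i c ds

-- outer 'for i, c in enumerate(s)' loop of Source B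
def bOuter (s : List Char) (last : PySem.Dict Char Int) : List (Int × Char) → Option Int
  | [] => none
  | (i, c) :: rest =>
    match bInner s last i c candDigits with
    | some r => some r
    | none => bOuter s last rest

def process_alt (digit : Int) : Int :=
  let s := PySem.Int.toChars digit
  let last := (PySem.List.enumerate s).foldl (fun d p => d.insert p.2 p.1) PySem.Dict.empty
  match bOuter s last (PySem.List.enumerate s) with
  | some r => r
  | none => digit

-- ===== PRECONDITION & SPEC =====
-- Pre_ excludes negative inputs: there str(digit) starts with '-', A always swaps the '-'
-- away from the front and int(''.join(nums)) raises ValueError (B raises the same way).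
def Pre_process (digit : Int) : Prop := 0 ≤ digit
instance (digit : Int) : Decidable (Pre_process digit) := by unfold Pre_process; infer_instance
def pvWitness_process : Int := 2736

def Spec_process (digit : Int) (out : Int) : Prop := out = process_alt digit
instance (digit : Int) (out : Int) : Decidable (Spec_process digit out) := by unfold Spec_process; infer_instance

-- ===== CLAIM (what is proved, stated in full; the proofs are below) =====
def Claim_equal_process : Prop := ∀ (digit : Int), Dom_process digit → Pre_process digit → Spec_process digit (process digit)

-- ===== LEMMAS AND PROOFS =====

-- maximum character of a list (Char.ofNat 0 for [], smaller than every character that occurs)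
def mx : List Char → Char
  | [] => Char.ofNat 0
  | c :: r => max c (mx r)

-- index of the RIGHTMOST occurrence of the maximum (A's id_max tie-breaking)
def ram : List Char → Nat
  | [] => 0
  | [_] => 0
  | c :: r => if mx r < c then 0 else ram r + 1

-- "position i qualifies": some later character is strictly larger
def qual (cs : List Char) (i : Nat) : Bool :=
  match cs.drop i with
  | [] => false
  | c :: rest => decide (c < mx rest)

-- last position of a character in a list
def lpos : List Char → Char → Option Nat
  | [], _ => none
  | c :: r, d =>
    match lpos r d with
    | some k => some (k + 1)
    | none => if c = d then some 0 else none

-- the common swapped value both programs return at the chosen position i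
def swapVal (cs : List Char) (i : Nat) : Int :=
  let j := i + 1 + ram (cs.drop (i + 1))
  (PySem.Int.ofChars? ((cs.set i (cs.getD j ' ')).set j (cs.getD i ' '))).getD 0

def lastDict (cs : List Char) : PySem.Dict Char Int :=
  (PySem.List.enumerate cs).foldl (fun d p => d.insert p.2 p.1) PySem.Dict.empty

def lastI (cs : List Char) (x : Char) : Int := (lastDict cs).getD x (-1)

theorem not_lt_chr0 (c : Char) : ¬ c < Char.ofNat 0 := by
  simp [Char.lt_def]

theorem le_mx (l : List Char) : ∀ x ∈ l, x ≤ mx l := by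
  intro x hx
  induction l with
  | nil => cases hx
  | cons c r ih =>
    rcases List.mem_cons.mp hx with h | h
    · simp [mx, h]
    · simp only [mx, le_max_iff]
      exact Or.inr (ih h)

theorem mx_mem (l : List Char) (h : l ≠ []) : mx l ∈ l := by
  induction l with
  | nil => exact absurd rfl h
  | cons c r ih =>
    rcases eq_or_ne r [] with hr | hr
    · subst hr
      simp only [mx, List.mem_cons]
      exact Or.inl (max_eq_left (le_of_not_gt (not_lt_chr0 c)))
    · simp only [mx]
      rcases le_total (mx r) c with h1 | h1
      · simp [max_eq_left h1]
      · rw [max_eq_right h1]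
        exact List.mem_cons_of_mem _ (ih hr)

theorem ram_cons (c : Char) (r : List Char) (h : r ≠ []) :
    ram (c :: r) = if mx r < c then 0 else ram r + 1 := by
  cases r with
  | nil => exact absurd rfl h
  | cons a t => rfl

theorem ram_lt (l : List Char) (h : l ≠ []) : ram l < l.length := by
  induction l with
  | nil => exact absurd rfl h
  | cons c r ih =>
    rcases eq_or_ne r [] with hr | hr
    · subst hr; simp [ram]
    · rw [ram_cons c r hr]
      split
      · simp
      · simpa using Nat.succ_lt_succ (ih hr)

theorem ram_get (l : List Char) (h : l ≠ []) : l[ram l]? = some (mx l) := by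
  induction l with
  | nil => exact absurd rfl h
  | cons c r ih =>
    rcases eq_or_ne r [] with hr | hr
    · subst hr
      have h2 : max c (Char.ofNat 0) = c := max_eq_left (le_of_not_gt (not_lt_chr0 c))
      simp [ram, mx, h2]
    · rw [ram_cons c r hr]
      split
      · next hlt =>
        simp [mx, max_eq_left (le_of_lt hlt)]
      · next hlt =>
        simp only [mx, max_eq_right (le_of_not_gt hlt), List.getElem?_cons_succ]
        exact ih hr

theorem ram_last (l : List Char) : ∀ m, ram l < m → l[m]? ≠ some (mx l) := by
  intro m hm
  induction l generalizing m with
  | nil => simp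
  | cons c r ih =>
    rcases eq_or_ne r [] with hr | hr
    · subst hr
      have hm1 : 1 ≤ m := by simpa [ram] using Nat.lt_of_lt_of_le hm (le_refl m)
      cases m with
      | zero => simp [ram] at hm
      | succ m => simp
    · rw [ram_cons c r hr] at hm
      by_cases hlt : mx r < c
      · rw [if_pos hlt] at hm
        have hmx : mx (c :: r) = c := by simp [mx, max_eq_left (le_of_lt hlt)]
        cases m with
        | zero => omega
        | succ m =>
          rw [hmx]
          simp only [List.getElem?_cons_succ]
          intro hc
          rcases List.getElem?_eq_some_iff.mp hc with ⟨hlen, hv⟩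
          have hle : c ≤ mx r := hv ▸ le_mx r _ (List.getElem_mem hlen)
          exact absurd (lt_of_lt_of_le hlt hle) (lt_irrefl _)
      · rw [if_neg hlt] at hm
        have hmx : mx (c :: r) = mx r := by simp [mx, max_eq_right (le_of_not_gt hlt)]
        cases m with
        | zero => omega
        | succ m =>
          rw [hmx]
          simp only [List.getElem?_cons_succ]
          exact ih m (by omega)

theorem lpos_eq_none_iff (l : List Char) (d : Char) : lpos l d = none ↔ d ∉ l := by
  induction l with
  | nil => simp [lpos]
  | cons c r ih =>
    simp only [lpos]
    cases h : lpos r d with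
    | some k =>
      have hd : d ∈ r := by
        by_contra hn
        rw [ih.mpr hn] at h
        cases h
      simp [hd]
    | none =>
      have hd : d ∉ r := ih.mp h
      by_cases hc : c = d
      · simp [hc, hd]
      · simp only [if_neg hc]
        simp only [List.mem_cons, not_or, true_iff]
        exact ⟨fun h2 => hc h2.symm, hd⟩

theorem lpos_eq_some_iff (l : List Char) (d : Char) (k : Nat) :
    lpos l d = some k ↔ l[k]? = some d ∧ ∀ m, k < m → l[m]? ≠ some d := by
  induction l generalizing k with
  | nil => simp [lpos]
  | cons c r ih =>
    simp only [lpos]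
    cases h : lpos r d with
    | some j =>
      have hj := (ih j).mp h
      constructor
      · rintro h2
        have hk : k = j + 1 := by simpa using h2.symm
        subst hk
        refine ⟨by simpa using hj.1, ?_⟩
        intro m hm
        cases m with
        | zero => omega
        | succ m => simpa using hj.2 m (by omega)
      · rintro ⟨hget, hafter⟩
        cases k with
        | zero =>
          exfalso
          exact hafter (j + 1) (by omega) (by simpa using hj.1)
        | succ k =>
          have h2 : lpos r d = some k := (ih k).mpr ⟨by simpa using hget, fun m hm hcon => hafter (m + 1) (by omega) (by simpa using hcon)⟩
          rw [h] at h2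
          simp only [Option.some.injEq] at h2
          simp [h2]
    | none =>
      have hd : d ∉ r := (lpos_eq_none_iff r d).mp h
      by_cases hc : c = d
      · subst hc
        constructor
        · rintro h2
          have hk : k = 0 := by simpa using h2.symm
          subst hk
          refine ⟨by simp, ?_⟩
          intro m hm
          cases m with
          | zero => omega
          | succ m =>
            simp only [List.getElem?_cons_succ]
            intro hcon
            exact hd (List.mem_of_getElem? hcon)
        · rintro ⟨hget, _⟩
          cases k with
          | zero => simp
          | succ k => exact absurd (List.mem_of_getElem? (by simpa using hget)) hd
      · simp only [if_neg hc]
        constructor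
        · intro h2; cases h2
        · rintro ⟨hget, _⟩
          cases k with
          | zero =>
            have hcd : c = d := by simpa using hget
            exact absurd hcd hc
          | succ k => exact absurd (List.mem_of_getElem? (by simpa using hget)) hd

theorem lastDict_getD (x : Char) :
    ∀ (l : List Char) (s : Int) (d0 : PySem.Dict Char Int),
      ((PySem.List.enumerate l s).foldl (fun d p => d.insert p.2 p.1) d0).getD x (-1)
        = match lpos l x with
          | some k => s + k
          | none => d0.getD x (-1) := by
  intro l
  induction l with
  | nil => intro s d0; simp [PySem.List.enumerate, lpos]
  | cons c t ih =>
    intro s d0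
    have he : PySem.List.enumerate (c :: t) s = (s, c) :: PySem.List.enumerate t (s + 1) := by
      simp [PySem.List.enumerate]
    rw [he]
    simp only [List.foldl_cons]
    rw [ih (s + 1) (d0.insert c s)]
    simp only [lpos]
    cases h : lpos t x with
    | some k =>
      show s + 1 + (k : Int) = s + ((k : Nat) + 1 : Nat)
      push_cast
      ring
    | none =>
      rw [PySem.Dict.getD_insert]
      by_cases hx : c = x
      · subst hx; simp
      · rw [if_neg (fun h2 => hx h2.symm), if_neg hx]

theorem lastI_eq (cs : List Char) (x : Char) :
    lastI cs x = match lpos cs x with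
      | some k => (k : Int)
      | none => -1 := by
  show ((PySem.List.enumerate cs 0).foldl (fun d p => d.insert p.2 p.1) PySem.Dict.empty).getD x (-1) = _
  rw [lastDict_getD x cs 0 PySem.Dict.empty]
  cases h : lpos cs x with
  | some k => simp
  | none => simp [PySem.Dict.getD_empty]

theorem lastI_gt_iff (cs : List Char) (x : Char) (i : Nat) :
    (i : Int) < lastI cs x ↔ x ∈ cs.drop (i + 1) := by
  rw [lastI_eq]
  cases h : lpos cs x with
  | none =>
    have hx : x ∉ cs := (lpos_eq_none_iff cs x).mp h
    show (i : Int) < -1 ↔ _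
    constructor
    · intro hlt; omega
    · intro hmem; exact absurd (List.mem_of_mem_drop hmem) hx
  | some k =>
    obtain ⟨hget, hafter⟩ := (lpos_eq_some_iff cs x k).mp h
    show (i : Int) < (k : Int) ↔ _
    constructor
    · intro hlt
      have hik : i + 1 ≤ k := by omega
      have : (cs.drop (i + 1))[k - (i + 1)]? = some x := by
        rw [List.getElem?_drop]
        rw [show i + 1 + (k - (i + 1)) = k by omega]
        exact hget
      exact List.mem_of_getElem? this
    · intro hmem
      obtain ⟨j, hj, hjv⟩ := List.getElem_of_mem hmem
      have hget2 : cs[i + 1 + j]? = some x := by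
        rw [← List.getElem?_drop]
        exact hjv ▸ List.getElem?_eq_getElem hj
      by_contra hno
      exact hafter (i + 1 + j) (by omega) hget2

theorem lastI_best (cs : List Char) (i : Nat) (hr : cs.drop (i + 1) ≠ []) :
    lastI cs (mx (cs.drop (i + 1))) = ((i + 1 + ram (cs.drop (i + 1)) : Nat) : Int) := by
  have hs : lpos cs (mx (cs.drop (i + 1))) = some (i + 1 + ram (cs.drop (i + 1))) := by
    rw [lpos_eq_some_iff]
    constructor
    · rw [← List.getElem?_drop]
      exact ram_get _ hr
    · intro m hm
      have hm1 : i + 1 ≤ m := by omega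
      rw [show m = i + 1 + (m - (i + 1)) by omega, ← List.getElem?_drop]
      exact ram_last _ _ (by omega)
  rw [lastI_eq, hs]

theorem digit_mem_cand (M : Char) (h0 : '0' < M) (h9 : M ≤ '9') : M ∈ candDigits := by
  have h0' : 48 < M.toNat := by
    rw [Char.lt_def, UInt32.lt_iff_toNat_lt] at h0
    have h48 : ('0' : Char).val.toNat = 48 := by decide
    rw [h48] at h0
    exact h0
  have h9' : M.toNat ≤ 57 := by
    rw [Char.le_def, UInt32.le_iff_toNat_le] at h9
    have h57 : ('9' : Char).val.toNat = 57 := by decide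
    rw [h57] at h9
    exact h9
  have hM : M = Char.ofNat M.toNat := (Char.ofNat_toNat M).symm
  interval_cases h : M.toNat <;> rw [hM] <;> decide

theorem getDf (cs : List Char) (i : Nat) (h : i < cs.length) :
    (PySem.List.pyGet? cs (i : Int)).getD ' ' = cs[i] := by
  rw [PySem.List.pyGet?_natCast, List.getElem?_eq_getElem h]
  rfl

theorem qual_eq (cs : List Char) (i : Nat) (h : i < cs.length) :
    qual cs i = decide (cs[i] < mx (cs.drop (i + 1))) := by
  unfold qual
  rw [List.drop_eq_getElem_cons h]

theorem bInner_none (cs : List Char) (i : Nat) (c : Char) :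
    ∀ ds : List Char, (∀ d ∈ ds, c < d → d ∉ cs.drop (i + 1)) →
      bInner cs (lastDict cs) (i : Int) c ds = none := by
  intro ds
  induction ds with
  | nil => intro _; rfl
  | cons d t ih =>
    intro hall
    simp only [bInner]
    by_cases hdc : d ≤ c
    · rw [if_pos hdc]
    · rw [if_neg hdc]
      have hnj : ¬ (i : Int) < (lastDict cs).getD d (-1) := by
        show ¬ (i : Int) < lastI cs d
        rw [lastI_gt_iff]
        exact hall d List.mem_cons_self (lt_of_not_ge hdc)
      rw [if_neg hnj]
      exact ih (fun e he hce => hall e (List.mem_cons_of_mem d he) hce)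

theorem bInner_hit (cs : List Char) (i : Nat) (c M : Char)
    (hin : M ∈ cs.drop (i + 1)) (hbig : ∀ d, M < d → d ∉ cs.drop (i + 1)) (hc : c < M) :
    ∀ ds : List Char, ds.Pairwise (· > ·) → M ∈ ds →
      bInner cs (lastDict cs) (i : Int) c ds =
        some ((PySem.Int.ofChars?
          ((cs.set ((i : Int)).toNat ((PySem.List.pyGet? cs (lastI cs M)).getD ' ')).set
            (lastI cs M).toNat c)).getD 0) := by
  intro ds
  induction ds with
  | nil => intro _ hM; cases hM
  | cons d t ih =>
    intro hp hM
    have hall : ∀ x ∈ t, x < d := by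
      intro x hx
      exact (List.pairwise_cons.mp hp).1 x hx
    simp only [bInner]
    rcases List.mem_cons.mp hM with hMd | hMt
    · subst hMd
      rw [if_neg (not_le.mpr hc)]
      have hj : (i : Int) < (lastDict cs).getD M (-1) := by
        show (i : Int) < lastI cs M
        rw [lastI_gt_iff]
        exact hin
      rw [if_pos hj]
      rfl
    · have hdM : M < d := hall M hMt
      rw [if_neg (not_le.mpr (lt_trans hc hdM))]
      have hnj : ¬ (i : Int) < (lastDict cs).getD d (-1) := by
        show ¬ (i : Int) < lastI cs d
        rw [lastI_gt_iff]
        exact hbig d hdM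
      rw [if_neg hnj]
      exact ih (List.pairwise_cons.mp hp).2 hMt

theorem aLoop_inv (cs : List Char) :
    ∀ (f : Nat), f < cs.length → ∀ i1 i2 : Int,
      aLoop cs f (((f + ram (cs.drop f) : Nat) : Int), i1, i2)
        = (((ram cs : Nat) : Int),
           match (List.range f).find? (qual cs) with
           | some i => ((i : Int), ((i + 1 + ram (cs.drop (i + 1)) : Nat) : Int))
           | none => (i1, i2)) := by
  intro f
  induction f with
  | zero =>
    intro h i1 i2
    simp [aLoop]
  | succ f ih =>
    intro h i1 i2
    have hf : f < cs.length := by omega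
    have hr : cs.drop (f + 1) ≠ [] := by
      have hlen : (cs.drop (f + 1)).length = cs.length - (f + 1) := List.length_drop
      intro hnil
      rw [hnil] at hlen
      simp at hlen
      omega
    have hdropf : cs.drop f = cs[f] :: cs.drop (f + 1) := List.drop_eq_getElem_cons hf
    have hmlt : f + 1 + ram (cs.drop (f + 1)) < cs.length := by
      have h1 := ram_lt _ hr
      have h2 : (cs.drop (f + 1)).length = cs.length - (f + 1) := List.length_drop
      omega
    have hci : (PySem.List.pyGet? cs ((f : Nat) : Int)).getD ' ' = cs[f] := getDf cs f hf
    have hcm : (PySem.List.pyGet? cs (((f + 1 + ram (cs.drop (f + 1)) : Nat) : Int))).getD ' '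
        = mx (cs.drop (f + 1)) := by
      rw [getDf cs _ hmlt]
      have hg := ram_get _ hr
      have h2 : (cs.drop (f + 1))[ram (cs.drop (f + 1))]? = cs[f + 1 + ram (cs.drop (f + 1))]? :=
        List.getElem?_drop
      rw [hg, List.getElem?_eq_getElem hmlt] at h2
      exact (Option.some_inj.mp h2).symm
    have hrange : (List.range (f + 1)).find? (qual cs)
        = ((List.range f).find? (qual cs)).or (if qual cs f then some f else none) := by
      rw [List.range_succ, List.find?_append]
      congr 1
      cases hqf : qual cs f <;> simp [List.find?, hqf]
    have hramf : ram (cs.drop f) = if mx (cs.drop (f + 1)) < cs[f] then 0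
        else ram (cs.drop (f + 1)) + 1 := by
      rw [hdropf]
      exact ram_cons _ _ hr
    have hq : qual cs f = decide (cs[f] < mx (cs.drop (f + 1))) := qual_eq cs f hf
    simp only [aLoop, hci, hcm]
    by_cases h1 : mx (cs.drop (f + 1)) < cs[f]
    · rw [if_pos h1]
      have hst : ((f : Nat) : Int) = ((f + ram (cs.drop f) : Nat) : Int) := by
        rw [hramf, if_pos h1]
        simp
      rw [hst, ih hf i1 i2, hrange]
      have hqf : qual cs f = false := by
        rw [hq]
        exact decide_eq_false (asymm h1)
      rw [hqf]
      cases hF : (List.range f).find? (qual cs) <;> simp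
    · rw [if_neg h1]
      have hst : ((f + 1 + ram (cs.drop (f + 1)) : Nat) : Int) = ((f + ram (cs.drop f) : Nat) : Int) := by
        rw [hramf, if_neg h1]
        congr 1
        omega
      by_cases h2 : cs[f] < mx (cs.drop (f + 1))
      · rw [if_pos h2, hst, ih hf _ _, hrange]
        have hqf : qual cs f = true := by rw [hq]; exact decide_eq_true h2
        rw [hqf]
        cases hF : (List.range f).find? (qual cs) <;> simp [← hst]
      · rw [if_neg h2, hst, ih hf i1 i2, hrange]
        have hqf : qual cs f = false := by rw [hq]; exact decide_eq_false h2
        rw [hqf]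
        cases hF : (List.range f).find? (qual cs) <;> simp

theorem bOuter_inv (cs : List Char) (hd : ∀ c ∈ cs, '0' ≤ c ∧ c ≤ '9') :
    ∀ (k t : Nat), t + k = cs.length →
      bOuter cs (lastDict cs) (PySem.List.enumerate (cs.drop t) (t : Int))
        = match (List.range' t k).find? (qual cs) with
          | some i => some (swapVal cs i)
          | none => none := by
  intro k
  induction k with
  | zero =>
    intro t ht
    have hdrop : cs.drop t = [] := List.drop_eq_nil_of_le (by omega)
    rw [hdrop]
    simp [PySem.List.enumerate, bOuter]
  | succ k ih =>
    intro t ht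
    have htlt : t < cs.length := by omega
    have hdropf : cs.drop t = cs[t] :: cs.drop (t + 1) := List.drop_eq_getElem_cons htlt
    rw [hdropf]
    have he : PySem.List.enumerate (cs[t] :: cs.drop (t + 1)) (t : Int)
        = ((t : Int), cs[t]) :: PySem.List.enumerate (cs.drop (t + 1)) (((t + 1 : Nat) : Int)) := by
      simp [PySem.List.enumerate]
    rw [he]
    simp only [bOuter]
    have hq : qual cs t = decide (cs[t] < mx (cs.drop (t + 1))) := qual_eq cs t htlt
    rw [List.range'_succ]
    by_cases h1 : cs[t] < mx (cs.drop (t + 1))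
    · -- position t qualifies: the inner loop finds the swap
      have hr : cs.drop (t + 1) ≠ [] := by
        intro hnil
        rw [hnil] at h1
        exact not_lt_chr0 _ h1
      have hM9 : '0' ≤ mx (cs.drop (t + 1)) ∧ mx (cs.drop (t + 1)) ≤ '9' :=
        hd _ (List.mem_of_mem_drop (mx_mem _ hr))
      have h0t : '0' ≤ cs[t] := (hd _ (List.getElem_mem htlt)).1
      have hMc : mx (cs.drop (t + 1)) ∈ candDigits :=
        digit_mem_cand _ (lt_of_le_of_lt h0t h1) hM9.2
      have hhit := bInner_hit cs t cs[t] (mx (cs.drop (t + 1))) (mx_mem _ hr)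
        (fun d hdM hmem => absurd (le_mx _ d hmem) (not_le.mpr hdM)) h1
        candDigits (by decide) hMc
      rw [hhit]
      have hlast : lastI cs (mx (cs.drop (t + 1))) = ((t + 1 + ram (cs.drop (t + 1)) : Nat) : Int) :=
        lastI_best cs t hr
      have hjlt : t + 1 + ram (cs.drop (t + 1)) < cs.length := by
        have hrl := ram_lt _ hr
        have h2 : (cs.drop (t + 1)).length = cs.length - (t + 1) := List.length_drop
        omega
      have hfind : (t :: List.range' (t + 1) k).find? (qual cs) = some t := by
        simp [List.find?, hq, h1]
      rw [hfind, hlast]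
      simp only []
      unfold swapVal
      simp only [Int.toNat_natCast]
      rw [getDf cs _ hjlt]
      rw [List.getD_eq_getElem?_getD, List.getD_eq_getElem?_getD,
        List.getElem?_eq_getElem hjlt, List.getElem?_eq_getElem htlt]
      rfl
    · -- position t does not qualify: the inner loop breaks without a swap
      have hnone := bInner_none cs t cs[t] candDigits (by
        intro d hdc hlt hmem
        exact absurd (lt_of_lt_of_le hlt (le_trans (le_mx _ d hmem) (not_lt.mp h1))) (lt_irrefl _))
      rw [hnone]
      simp only []
      have hfind : (t :: List.range' (t + 1) k).find? (qual cs)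
          = (List.range' (t + 1) k).find? (qual cs) := by
        simp [List.find?, hq, h1]
      rw [hfind]
      exact ih (t + 1) (by omega)

theorem toDigits_digits (m : Nat) : ∀ c ∈ Nat.toDigits 10 m, '0' ≤ c ∧ c ≤ '9' := by
  have core : ∀ (f n : Nat) (acc : List Char), ∀ c ∈ Nat.toDigitsCore 10 f n acc,
      c ∈ acc ∨ ('0' ≤ c ∧ c ≤ '9') := by
    intro f
    induction f with
    | zero => intro n acc c hc; exact Or.inl hc
    | succ f ih =>
      intro n acc c hc
      have hd : '0' ≤ (n % 10).digitChar ∧ (n % 10).digitChar ≤ '9' := by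
        have h10 : n % 10 < 10 := Nat.mod_lt _ (by omega)
        interval_cases h : n % 10 <;> exact ⟨by decide, by decide⟩
      simp only [Nat.toDigitsCore] at hc
      split at hc
      · rcases List.mem_cons.mp hc with h | h
        · exact Or.inr (h ▸ hd)
        · exact Or.inl h
      · rcases ih _ _ c hc with h | h
        · rcases List.mem_cons.mp h with h2 | h2
          · exact Or.inr (h2 ▸ hd)
          · exact Or.inl h2
        · exact Or.inr h
  intro c hc
  rcases core (m + 1) m [] c hc with h | h
  · cases h
  · exact h

theorem toDigits_ne_nil (m : Nat) : Nat.toDigits 10 m ≠ [] := by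
  have core : ∀ (f n : Nat) (acc : List Char), acc ≠ [] → Nat.toDigitsCore 10 f n acc ≠ [] := by
    intro f
    induction f with
    | zero => intro n acc h; simpa [Nat.toDigitsCore] using h
    | succ f ih =>
      intro n acc h
      simp only [Nat.toDigitsCore]
      split
      · simp
      · exact ih _ _ (by simp)
  show Nat.toDigitsCore 10 (m + 1) m [] ≠ []
  simp only [Nat.toDigitsCore]
  split
  · simp
  · exact core _ _ _ (by simp)

-- ===== VERDICT (by name: the statement is the Claim_ definition above) =====
theorem process_spec : Claim_equal_process := by
  intro digit hDom hPre
  unfold Spec_process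
  unfold process process_alt
  simp only []
  have hPre' : ¬ digit < 0 := by
    unfold Pre_process at hPre
    omega
  have hcseq : PySem.Int.toChars digit = Nat.toDigits 10 digit.toNat := by
    unfold PySem.Int.toChars
    rw [if_neg hPre']
  set cs := PySem.Int.toChars digit with hcs
  have hd : ∀ c ∈ cs, '0' ≤ c ∧ c ≤ '9' := by rw [hcseq]; exact toDigits_digits _
  have hne : cs ≠ [] := by rw [hcseq]; exact toDigits_ne_nil _
  obtain ⟨n, hn⟩ : ∃ n, cs.length = n + 1 := by
    cases hl : cs.length with
    | zero => exact absurd (List.eq_nil_of_length_eq_zero hl) hne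
    | succ n => exact ⟨n, rfl⟩
  have hnlt : n < cs.length := by omega
  have hdn : cs.drop n = [cs[n]] := by
    rw [List.drop_eq_getElem_cons hnlt, List.drop_eq_nil_of_le (by omega)]
  -- A's loop: the first iteration (i = n) compares nums[n] with itself and changes nothing
  have hfirst : aLoop cs cs.length ((cs.length : Int) - 1, -1, -1)
      = aLoop cs n (((n + ram (cs.drop n) : Nat) : Int), -1, -1) := by
    rw [hn]
    have hcast : ((n + 1 : Nat) : Int) - 1 = ((n : Nat) : Int) := by push_cast; ring
    rw [hcast]
    simp only [aLoop]
    rw [if_neg (lt_irrefl _), if_neg (lt_irrefl _)]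
    rw [hdn]
    rfl
  rw [hfirst, aLoop_inv cs n hnlt (-1) (-1)]
  -- B's loop over the whole enumerate
  have hB : bOuter cs (lastDict cs) (PySem.List.enumerate cs)
      = match (List.range' 0 cs.length).find? (qual cs) with
        | some i => some (swapVal cs i)
        | none => none := by
    have h0 : PySem.List.enumerate cs = PySem.List.enumerate (cs.drop 0) ((0 : Nat) : Int) := by
      rw [List.drop_zero]
      rfl
    rw [h0]
    exact bOuter_inv cs hd cs.length 0 (by omega)
  show _ = (match bOuter cs (lastDict cs) (PySem.List.enumerate cs) with
    | some r => r
    | none => digit)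
  rw [hB]
  -- the two scans inspect the same positions: position n (the last) never qualifies
  have hrange : (List.range' 0 cs.length).find? (qual cs) = (List.range n).find? (qual cs) := by
    rw [← List.range_eq_range', hn, List.range_succ, List.find?_append]
    have hqn : qual cs n = false := by
      rw [qual_eq cs n hnlt]
      rw [List.drop_eq_nil_of_le (by omega : cs.length ≤ n + 1)]
      exact decide_eq_false (not_lt_chr0 _)
    simp [List.find?, hqn]
  rw [hrange]
  cases hF : (List.range n).find? (qual cs) with
  | none =>
    simp only []
    rw [if_pos trivial]
  | some i =>
    simp only []
    have hi : i < n := by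
      exact List.mem_range.mp (List.mem_of_find?_eq_some hF)
    have hilt : i < cs.length := by omega
    have hjlt : i + 1 + ram (cs.drop (i + 1)) < cs.length := by
      have hr : cs.drop (i + 1) ≠ [] := by
        have hlen : (cs.drop (i + 1)).length = cs.length - (i + 1) := List.length_drop
        intro hnil
        rw [hnil] at hlen
        simp at hlen
        omega
      have h1 := ram_lt _ hr
      have h2 : (cs.drop (i + 1)).length = cs.length - (i + 1) := List.length_drop
      omega
    rw [if_neg (by omega : ¬ ((i : Nat) : Int) = -1)]
    unfold swapVal
    simp only [Int.toNat_natCast]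
    rw [getDf cs _ hjlt, getDf cs _ hilt]
    rw [List.getD_eq_getElem?_getD, List.getD_eq_getElem?_getD,
      List.getElem?_eq_getElem hjlt, List.getElem?_eq_getElem hilt]
    rfl
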